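-- pv_equiv track=rewrite | github.com/eneseken95/Python_Scripting | Examples/Product_Categorizer.py | categorize_products
-- ===== SOURCE A (Python) =====
-- def categorize_products(lines):
--     categories = {}
--
--     i = 0
--     while i < len(lines):
--         line = lines[i].strip()
--
--         if not line or line.startswith("#"):
--             i += 1
--             continue
--
--         if "," in line:
--             parts = line.split(",")
--             product = parts[0].strip()
--             category = parts[1].strip()
--         else:
--             product = line
--             i += 1
--             if i < len(lines):
--                 category = lines[i].strip()
--             else:
--                 i += 1
--                 continue
--
--         if category not in categories:
--             categories[category] = []
--
--         if product not in categories[category]: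
--             categories[category].append(product)
--
--         i += 1
--
--     for category in categories:
--         categories[category].sort()
--
--     return categories
-- ===== SOURCE B (Python) =====
-- def categorize_products(lines):
--     # One-pass state-machine parse: a 'pending' product awaits its category line.
--     pairs = []
--     pending = None
--     for raw in lines:
--         if pending is not None:
--             pairs.append((pending, raw.strip()))
--             pending = None
--             continue
--         s = raw.strip()
--         if not s or s.startswith("#"):
--             continue
--         if "," in s:
--             parts = s.split(",")
--             pairs.append((parts[0].strip(), parts[1].strip()))
--         else:
--             pending = s
--     # Append-everything grouping: duplicates are kept here; dedup and ordering
--     # happen only at emission, via sorted(set(...)).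
--     groups = {}
--     for p, c in pairs:
--         groups.setdefault(c, []).append(p)
--     return {c: sorted(set(ps)) for c, ps in groups.items()}
-- ===== Notes on version B (the rewrite author's own statement) =====
-- stated objective: alternative
-- what changed: A walks an index with i+=1/i+=2 arithmetic and interleaves grouping into a dict it dedups as it goes (list-membership scan per pair) and sorts in place at the end; B parses with a single for-loop state machine (a 'pending' product waiting for its category line) into a flat pair list, then groups by appending every product (duplicates kept) and dedups/orders only at emission via sorted(set(ps)).
import Mathlib
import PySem

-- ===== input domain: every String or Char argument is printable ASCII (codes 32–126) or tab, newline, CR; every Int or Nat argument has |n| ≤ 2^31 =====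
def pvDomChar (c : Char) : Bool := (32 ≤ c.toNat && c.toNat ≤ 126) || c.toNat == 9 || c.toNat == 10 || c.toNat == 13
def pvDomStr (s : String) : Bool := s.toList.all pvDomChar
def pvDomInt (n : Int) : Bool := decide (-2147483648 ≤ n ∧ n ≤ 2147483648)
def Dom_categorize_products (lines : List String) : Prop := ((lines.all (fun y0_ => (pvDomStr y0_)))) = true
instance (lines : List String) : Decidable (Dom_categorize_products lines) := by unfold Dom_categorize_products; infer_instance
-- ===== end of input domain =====

-- B replaces A's index-arithmetic loop with an interleaved dedup-as-you-go dict by a for-loop state-machine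
-- parse (a pending product awaiting its category line) and an append-everything grouping whose dedup and
-- ordering happen only at emission via sorted(set(...)); same return value (objective: alternative).

-- ===== PORT A =====
-- A's shared update code (runs once per accepted product/category pair in the Python loop body):
-- create-if-missing, then append product if not already in the category's list.
def pvAUpdate (cats : PySem.Dict String (List String)) (product category : String) :
    PySem.Dict String (List String) :=
  let cats := if cats.contains category then cats else cats.insert category []
  let cur := cats.getD category []
  if cur.contains product then cats else cats.insert category (cur ++ [product])

-- A's while-loop over the index i, rendered as structural recursion on the remaining suffix of `lines`
-- (i += 1 drops one line, the no-comma branch with a successor line drops two; exact).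
-- parts[0]/parts[1]: `","` is in `line`, so split? is `some` with ≥ 2 pieces — the getD defaults never fire (exact).
def pvALoop : List String → PySem.Dict String (List String) → PySem.Dict String (List String)
  | [], cats => cats
  | l :: rest, cats =>
    let line := PySem.Str.strip l
    if line = "" ∨ PySem.Str.startswith line "#" = true then
      pvALoop rest cats
    else if PySem.Str.isIn "," line = true then
      let parts := (PySem.Str.split? line ",").getD []
      pvALoop rest (pvAUpdate cats (PySem.Str.strip (PySem.List.pyGetD parts 0 ""))
                                   (PySem.Str.strip (PySem.List.pyGetD parts 1 "")))
    else
      match rest with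
      | [] => cats          -- i+1 == len(lines): skip and the while condition ends the loop
      | next :: rest' => pvALoop rest' (pvAUpdate cats line (PySem.Str.strip next))

-- `for category in categories: categories[category].sort()` then return: sort each value, keys in order.
def categorize_products (lines : List String) : List (String × List String) :=
  (pvALoop lines PySem.Dict.empty).items.map
    (fun p => (p.1, PySem.List.sorted p.2 (fun x => x) false))

-- ===== PORT B =====
-- Source B's parse loop: one for-loop over the lines with a `pending : Option String` state
-- (some p = a product p waiting for its category line, consumed verbatim-stripped even if blank/comment);
-- a pending product with no following line yields nothing — exact. Same split?/getD note as in port A.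
def pvBParse : List String → Option String → List (String × String)
  | [], _ => []
  | raw :: rest, some p => (p, PySem.Str.strip raw) :: pvBParse rest none
  | raw :: rest, none =>
    let s := PySem.Str.strip raw
    if s = "" ∨ PySem.Str.startswith s "#" = true then
      pvBParse rest none
    else if PySem.Str.isIn "," s = true then
      let parts := (PySem.Str.split? s ",").getD []
      (PySem.Str.strip (PySem.List.pyGetD parts 0 ""), PySem.Str.strip (PySem.List.pyGetD parts 1 ""))
        :: pvBParse rest none
    else
      pvBParse rest (some s)

-- Source B's grouping: groups.setdefault(c, []).append(p) mutates the list in place, i.e.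
-- groups[c] = groups.get(c, []) + [p] — exactly Dict.modify; duplicates are kept.
-- Final dict comprehension: sorted(set(ps)) per key, insertion order of keys kept;
-- sorted over a set without key is order-independent, so exact.
def categorize_products_alt (lines : List String) : List (String × List String) :=
  let pairs := pvBParse lines none
  let groups : PySem.Dict String (List String) :=
    pairs.foldl (fun d pc => d.modify pc.2 [] (fun v => v ++ [pc.1])) PySem.Dict.empty
  groups.items.map
    (fun p => (p.1, PySem.List.sorted (PySem.Set.ofList p.2) (fun x => x) false))

-- ===== PRECONDITION & SPEC =====
def Spec_categorize_products (lines : List String) (out : List (String × List String)) : Prop := out = categorize_products_alt lines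
instance (lines : List String) (out : List (String × List String)) : Decidable (Spec_categorize_products lines out) := by unfold Spec_categorize_products; infer_instance

-- ===== CLAIM (what is proved, stated in full; the proofs are below) =====
def Claim_equal_categorize_products : Prop := ∀ (lines : List String), Dom_categorize_products lines → Spec_categorize_products lines (categorize_products lines)

-- ===== LEMMAS AND PROOFS =====

-- A's loop is the fold of its per-pair update over the pairs B's state-machine parse emits.
theorem pvALoop_eq_foldl (rest : List String) (cats : PySem.Dict String (List String)) :
    pvALoop rest cats = (pvBParse rest none).foldl (fun d pc => pvAUpdate d pc.1 pc.2) cats := by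
  fun_induction pvALoop rest cats with
  | case1 => simp [pvBParse]
  | case2 l rest cats line h ih =>
    rw [pvBParse.eq_def]; dsimp only; rw [if_pos h]; exact ih
  | case3 l rest cats line h hc parts ih =>
    rw [pvBParse.eq_def]; dsimp only; rw [if_neg h, if_pos hc]; exact ih
  | case4 l cats line h hc =>
    rw [pvBParse.eq_def]; dsimp only; rw [if_neg h, if_neg hc]; rfl
  | case5 l cats line h hc next rest' ih =>
    rw [pvBParse.eq_def]; dsimp only; rw [if_neg h, if_neg hc]; exact ih

-- A's update preserves uniqueness of keys.
theorem pvAUpdate_nodup (d : PySem.Dict String (List String)) (p c : String)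
    (h : d.keys.Nodup) : (pvAUpdate d p c).keys.Nodup := by
  unfold pvAUpdate
  dsimp only
  split_ifs <;>
    first
      | exact h
      | exact PySem.Dict.nodup_keys_insert _ _ _ h
      | exact PySem.Dict.nodup_keys_insert _ _ _ (PySem.Dict.nodup_keys_insert _ _ _ h)

-- Re-inserting a key's current value changes nothing (unique keys).
theorem pvInsert_getD_self {κ ν : Type} [BEq κ] [LawfulBEq κ] (d : PySem.Dict κ ν) (c : κ) (d0 : ν)
    (h1 : d.contains c = true) (hnd : d.keys.Nodup) : d.insert c (d.getD c d0) = d := by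
  apply PySem.Dict.ext
  rw [PySem.Dict.items_insert_of_contains _ _ h1]
  conv_rhs => rw [show d.items = d.items.map id from (List.map_id _).symm]
  apply List.map_congr_left
  intro q hq
  obtain ⟨a, b⟩ := q
  by_cases hk : (a == c) = true
  · have hkc : a = c := by simpa using hk
    subst hkc
    have hv : d.getD a d0 = b := PySem.Dict.getD_of_mem_items d hq hnd d0
    simp [hv]
  · simp [hk]

-- On a dict with unique keys, A's update step is a single modify with Set.add.
theorem pvStep_eq (d : PySem.Dict String (List String)) (h : d.keys.Nodup) (p c : String) :
    pvAUpdate d p c = d.modify c PySem.Set.empty (fun s => PySem.Set.add s p) := by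
  unfold pvAUpdate
  dsimp only
  by_cases h1 : d.contains c = true
  · rw [if_pos h1]
    by_cases h2 : (d.getD c []).contains p = true
    · rw [if_pos h2]
      simp only [PySem.Dict.modify, PySem.Set.add, PySem.Set.empty, PySem.Set.contains]
      rw [if_pos h2, pvInsert_getD_self d c _ h1 h]
    · rw [if_neg h2]
      simp only [PySem.Dict.modify, PySem.Set.add, PySem.Set.empty, PySem.Set.contains]
      rw [if_neg h2]
  · rw [if_neg h1]
    have h1' : d.contains c = false := by simpa using h1
    have hg : d.getD c [] = [] := by simp [pysem, h1']
    simp [PySem.Dict.modify, PySem.Set.add, PySem.Set.empty, PySem.Set.contains,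
      PySem.Dict.getD_insert_self, hg, PySem.Dict.insert_insert_self]

theorem pvFold_eq (pairs : List (String × String)) (d : PySem.Dict String (List String))
    (h : d.keys.Nodup) :
    pairs.foldl (fun d pc => pvAUpdate d pc.1 pc.2) d
      = pairs.foldl (fun d pc => d.modify pc.2 PySem.Set.empty (fun s => PySem.Set.add s pc.1)) d := by
  induction pairs generalizing d with
  | nil => rfl
  | cons pc rest ih =>
    simp only [List.foldl_cons]
    rw [← pvStep_eq d h pc.1 pc.2]
    exact ih _ (pvAUpdate_nodup _ _ _ h)

-- The value at key c of a snd-keyed modify fold: the products of c folded into the starting value with g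
-- (instantiated with Set.add for A's dedup-as-you-go and with append for B's append-everything grouping).
theorem pvGetD_fold (g : List String → String → List String) (pairs : List (String × String))
    (d : PySem.Dict String (List String)) (c : String) :
    (pairs.foldl (fun d pc => d.modify pc.2 [] (fun v => g v pc.1)) d).getD c []
      = ((pairs.filter (fun pc => pc.2 == c)).map (fun pc => pc.1)).foldl g (d.getD c []) := by
  induction pairs generalizing d with
  | nil => rfl
  | cons pc rest ih =>
    simp only [List.foldl_cons, List.filter_cons]
    by_cases hc : pc.2 = c
    · subst hc
      simp only [BEq.rfl, if_pos, List.map_cons, List.foldl_cons]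
      rw [ih, PySem.Dict.getD_modify_self]
    · have : (pc.2 == c) = false := by simpa using hc
      rw [this]
      simp only [Bool.false_eq_true, if_false]
      rw [ih, PySem.Dict.getD_modify_of_ne _ _ _ (fun he => hc he.symm)]

-- ===== VERDICT (by name: the statement is the Claim_ definition above) =====
theorem categorize_products_spec : Claim_equal_categorize_products := by
  intro lines _
  unfold Spec_categorize_products categorize_products categorize_products_alt
  dsimp only
  rw [pvALoop_eq_foldl, pvFold_eq _ _ (by simp [PySem.Dict.empty])]
  set pairs := pvBParse lines none with hp
  have hndA : (pairs.foldl (fun d pc => d.modify pc.2 PySem.Set.empty (fun s => PySem.Set.add s pc.1)) PySem.Dict.empty).keys.Nodup :=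
    PySem.Dict.nodup_keys_foldl_modify_key pairs Prod.snd PySem.Set.empty
      (fun d pc s => PySem.Set.add s pc.1) PySem.Dict.empty (by simp [PySem.Dict.empty])
  have hndB : (pairs.foldl (fun d pc => d.modify pc.2 [] (fun v => v ++ [pc.1])) PySem.Dict.empty).keys.Nodup :=
    PySem.Dict.nodup_keys_foldl_modify_key pairs Prod.snd []
      (fun d pc v => v ++ [pc.1]) PySem.Dict.empty (by simp [PySem.Dict.empty])
  rw [PySem.Dict.items_eq_map_keys _ hndA PySem.Set.empty,
      PySem.Dict.items_eq_map_keys _ hndB []]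
  rw [PySem.Dict.keys_foldl_modify_key, PySem.Dict.keys_foldl_modify_key]
  simp only [List.map_map]
  apply List.map_congr_left
  intro c _
  simp only [Function.comp]
  rw [show (PySem.Set.empty : List String) = [] from rfl] at *
  rw [pvGetD_fold PySem.Set.add, pvGetD_fold (fun v p => v ++ [p])]
  rw [PySem.Dict.getD_empty, PySem.List.foldl_append_singleton, List.nil_append, ← PySem.Set.ofList_eq_foldl]
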